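-- pv_equiv track=rewrite | github.com/guileen/guileen.github.com | snippets/py2048/ai_rule.py | try_upgrade_block
-- ===== SOURCE A (Python) =====
-- W = 8
--
-- LEFT = 1
--
-- RIGHT = 2
--
-- DOWN = 4
--
-- def try_upgrade_block(map, y, x):
--   # 尝试提升奇异格，探索法
--   block = map[y][x]
--   # 若邻近有相同的则直接合并
--   if y>0 and block == map[y-1][x]:
--     return DOWN
--   elif x>0 and block == map[y][x-1]:
--     return RIGHT
--   elif x<W-1 and block == map[y][x+1]:
--     return LEFT
--   # 若左右上有接近于自己的则向最接近的搜索
--   neighbors = []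
--   if y>0:
--     neighbors.append((map[y-1][x], y-1, x))
--   if x>0:
--     neighbors.append((map[y][x-1], y, x-1))
--   if x<W-1:
--     neighbors.append((map[y][x+1], y, x+1))
--   for neighbor in sorted(neighbors, reverse=True):
--     if(block > neighbor[0] and neighbor[0]>0):
--       action = try_upgrade_block(map, neighbor[1], neighbor[2])
--       if action:
--         return action
-- ===== SOURCE B (Python) =====
-- W = 8
--
-- LEFT = 1
--
-- RIGHT = 2
--
-- DOWN = 4
--
-- def try_upgrade_block(map, y, x):
--   # explicit-stack DFS replacing A's recursion; the stack holds (value, y, x) triples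
--   stack = [(map[y][x], y, x)]
--   while stack:
--     block, y, x = stack.pop()
--     if y > 0 and block == map[y-1][x]:
--       return DOWN
--     if x > 0 and block == map[y][x-1]:
--       return RIGHT
--     if x < W-1 and block == map[y][x+1]:
--       return LEFT
--     neighbors = []
--     if y > 0:
--       neighbors.append((map[y-1][x], y-1, x))
--     if x > 0:
--       neighbors.append((map[y][x-1], y, x-1))
--     if x < W-1:
--       neighbors.append((map[y][x+1], y, x+1))
--     stack.extend(reversed([n for n in sorted(neighbors, reverse=True) if block > n[0] > 0]))
--   return None
-- ===== Notes on version B (the rewrite author's own statement) =====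
-- stated objective: alternative
-- what changed: A's pre-order recursion over qualifying neighbors is replaced by an iterative DFS with an explicit stack of (value, y, x) triples, pushing the reverse-sorted qualifying neighbors so they pop in A's visiting order.
-- outside the precondition, e.g. on try_upgrade_block([[9, 1], [5, 3]], 1, -2): A returns None, B returns None; on try_upgrade_block([[1, 2, 3]], 0, 2): A raises IndexError, B raises IndexError
import Mathlib
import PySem

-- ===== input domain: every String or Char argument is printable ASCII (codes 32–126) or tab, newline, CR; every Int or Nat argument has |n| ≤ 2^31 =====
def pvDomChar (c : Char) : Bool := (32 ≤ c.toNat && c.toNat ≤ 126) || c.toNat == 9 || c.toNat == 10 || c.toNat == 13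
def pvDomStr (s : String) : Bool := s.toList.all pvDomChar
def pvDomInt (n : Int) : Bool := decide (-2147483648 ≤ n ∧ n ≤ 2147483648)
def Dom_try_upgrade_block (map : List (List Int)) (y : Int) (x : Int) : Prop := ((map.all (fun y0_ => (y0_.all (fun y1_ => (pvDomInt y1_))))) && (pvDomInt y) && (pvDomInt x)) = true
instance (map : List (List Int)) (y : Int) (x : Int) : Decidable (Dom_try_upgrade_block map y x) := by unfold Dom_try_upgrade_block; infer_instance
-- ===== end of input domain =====

-- B replaces A's pre-order recursion by an explicit-stack DFS over (value, y, x) triples (objective: alternative; same return value, no speed claim).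


-- ===== PORT A =====
-- shared helpers: map[i][j] (the .getD defaults are unreachable inside Pre_, where every access is in range)
def pvCell (map : List (List Int)) (i j : Int) : Int :=
  (PySem.List.pyGet? ((PySem.List.pyGet? map i).getD []) j).getD 0

-- Python compares the 3-tuples lexicographically: key into the lexicographic product order
def pvKey (t : Int × Int × Int) : Lex (Int × Lex (Int × Int)) := toLex (t.1, toLex (t.2.1, t.2.2))

-- the conditionally-appended neighbor list of A (identical code in B)
def pvNeighbors (map : List (List Int)) (y x : Int) : List (Int × Int × Int) :=
  (if 0 < y then [(pvCell map (y-1) x, y-1, x)] else []) ++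
  (if 0 < x then [(pvCell map y (x-1), y, x-1)] else []) ++
  (if x < 7 then [(pvCell map y (x+1), y, x+1)] else [])

-- sorted(neighbors, reverse=True)
def pvSortedNbrs (map : List (List Int)) (y x : Int) : List (Int × Int × Int) :=
  PySem.List.sorted (pvNeighbors map y x) pvKey true

-- termination helpers for the ports (cited by decreasing_by)
theorem pvToNatLt (a b : Int) (h : a < b ∧ 0 < a) : a.toNat < b.toNat := by omega

theorem pvIteLen (c : Prop) [Decidable c] (t : Int × Int × Int) :
    (if c then [t] else []).length ≤ 1 := by split <;> simp

theorem pvLen3 (a b c : List (Int × Int × Int)) (ha : a.length ≤ 1) (hb : b.length ≤ 1)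
    (hc : c.length ≤ 1) : (a ++ b ++ c).length ≤ 3 := by
  simp only [List.length_append]; omega

theorem pvNbrsLen (map : List (List Int)) (y x : Int) : (pvNeighbors map y x).length ≤ 3 :=
  pvLen3 _ _ _ (pvIteLen _ _) (pvIteLen _ _) (pvIteLen _ _)

theorem pvSumLe (l : List (Int × Int × Int)) (b : Nat) (h : ∀ t ∈ l, t.1.toNat < b) :
    (l.map (fun t => 4 ^ t.1.toNat)).sum ≤ l.length * 4 ^ (b - 1) := by
  induction l with
  | nil => simp
  | cons t ts ih =>
    simp only [List.map_cons, List.sum_cons, List.length_cons]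
    have h1 : 4 ^ t.1.toNat ≤ 4 ^ (b - 1) :=
      Nat.pow_le_pow_right (by omega) (by have := h t List.mem_cons_self; omega)
    have h2 := ih (fun u hu => h u (List.mem_cons_of_mem _ hu))
    calc 4 ^ t.1.toNat + (ts.map (fun t => 4 ^ t.1.toNat)).sum
        ≤ 4 ^ (b - 1) + ts.length * 4 ^ (b - 1) := Nat.add_le_add h1 h2
      _ = (ts.length + 1) * 4 ^ (b - 1) := by ring

theorem pvSumPowLt (l : List (Int × Int × Int)) (b : Nat) (hlen : l.length ≤ 3)
    (h : ∀ t ∈ l, t.1.toNat < b) : (l.map (fun t => 4 ^ t.1.toNat)).sum < 4 ^ b := by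
  cases l with
  | nil => simp only [List.map_nil, List.sum_nil]; exact pow_pos (show (0:ℕ) < 4 by norm_num) b
  | cons t ts =>
    have hb : 1 ≤ b := by have := h t List.mem_cons_self; omega
    have hp : 0 < 4 ^ (b - 1) := pow_pos (show (0:ℕ) < 4 by omega) _
    calc ((t :: ts).map (fun t => 4 ^ t.1.toNat)).sum
        ≤ (t :: ts).length * 4 ^ (b - 1) := pvSumLe _ b h
      _ ≤ 3 * 4 ^ (b - 1) := Nat.mul_le_mul_right _ hlen
      _ < 4 * 4 ^ (b - 1) := by omega
      _ = 4 ^ b := by rw [← pow_succ']; congr 1; omega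

-- the decrease fact for B's stack loop (cited by name in decreasing_by)
theorem pvGoBDec (map : List (List Int)) (block y x : Int) (rest : List (Int × Int × Int)) :
    ((((pvSortedNbrs map y x).filter (fun n => decide (n.1 < block ∧ 0 < n.1))) ++ rest).map
        (fun t => 4 ^ t.1.toNat)).sum <
      (((block, y, x) :: rest).map (fun t => 4 ^ t.1.toNat)).sum := by
  have hlen : ((pvSortedNbrs map y x).filter (fun n => decide (n.1 < block ∧ 0 < n.1))).length ≤ 3 :=
    le_trans (List.length_filter_le _ _)
      (le_of_eq_of_le (PySem.List.length_sorted _ _ _) (pvNbrsLen map y x))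
  have hmem : ∀ t ∈ (pvSortedNbrs map y x).filter (fun n => decide (n.1 < block ∧ 0 < n.1)),
      t.1.toNat < block.toNat :=
    fun t ht => pvToNatLt t.1 block (of_decide_eq_true (List.mem_filter.mp ht).2)
  rw [List.map_append, List.sum_append, List.map_cons, List.sum_cons]
  exact Nat.add_lt_add_right (pvSumPowLt _ block.toNat hlen hmem) _

-- port of A: fueled recursion (fuel 2^31+2 never runs out inside Dom: the cell value strictly
-- decreases along the recursion and |values| ≤ 2^31 there)
mutual
def pvGoA (map : List (List Int)) : Nat → Int → Int → Option Int
  | 0, _, _ => none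
  | f+1, y, x =>
    let block := pvCell map y x
    if 0 < y ∧ block = pvCell map (y-1) x then some 4
    else if 0 < x ∧ block = pvCell map y (x-1) then some 2
    else if x < 7 ∧ block = pvCell map y (x+1) then some 1
    else pvLoopA map f block (pvSortedNbrs map y x)
  termination_by f _ _ => (f, 0)

def pvLoopA (map : List (List Int)) : Nat → Int → List (Int × Int × Int) → Option Int
  | _, _, [] => none
  | f, block, n :: ns =>
    if n.1 < block ∧ 0 < n.1 then
      match pvGoA map f n.2.1 n.2.2 with
      | some a => if a = 0 then pvLoopA map f block ns else some a
      | none => pvLoopA map f block ns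
    else pvLoopA map f block ns
  termination_by f _ ns => (f, ns.length + 1)
end

def try_upgrade_block (map : List (List Int)) (y : Int) (x : Int) : Option Int :=
  pvGoA map 2147483650 y x

-- ===== PORT B =====
-- explicit-stack DFS; stack head = top; popping (block,y,x), children pushed in pop order
def pvGoB (map : List (List Int)) : List (Int × Int × Int) → Option Int
  | [] => none
  | (block, y, x) :: rest =>
    if 0 < y ∧ block = pvCell map (y-1) x then some 4
    else if 0 < x ∧ block = pvCell map y (x-1) then some 2
    else if x < 7 ∧ block = pvCell map y (x+1) then some 1
    else pvGoB map (((pvSortedNbrs map y x).filter (fun n => decide (n.1 < block ∧ 0 < n.1))) ++ rest)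
  termination_by st => (st.map (fun t => 4 ^ t.1.toNat)).sum
  decreasing_by exact pvGoBDec map block y x rest

def try_upgrade_block_alt (map : List (List Int)) (y : Int) (x : Int) : Option Int :=
  pvGoB map [(pvCell map y x, y, x)]

-- ===== PRECONDITION & SPEC =====
-- Pre_'s only job is to exclude the inputs on which A raises IndexError (the equality proved below
-- holds wherever both ports are defined, with or without Pre_).  The exact no-raise set depends on
-- the cell values along the search, so Pre_ is a closed-form under-approximation, the union of two
-- sound cases: (a) a search from (y,x) only ever indexes rows {y} ∪ [0,y) (Python indexing,
-- negative y wraps) and columns in [min x 0, max x 7], and every such access is in range; or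
-- (b) A decides at the root (merge or no qualifying neighbor) with all root accesses in range.
-- This conservatively also excludes some narrow-grid inputs whose recursive search happens to
-- return before any bad access (see cites); B agrees with A on those too.
def pvRowsNeeded (map : List (List Int)) (y : Int) : List (List Int) :=
  if 0 ≤ y then map.take (y.toNat + 1) else [((PySem.List.pyGet? map y).getD [])]

-- map[i][j] is a valid (possibly negative, wrapping) Python access
def pvValidB (map : List (List Int)) (i j : Int) : Bool :=
  (PySem.List.pyGet? map i).isSome &&
    (PySem.List.pyGet? ((PySem.List.pyGet? map i).getD []) j).isSome

-- no neighbor entry qualifies for the recursive search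
def pvNoQual (b : Int) (l : List (Int × Int × Int)) : Bool :=
  l.all (fun n => !(decide (n.1 < b ∧ 0 < n.1)))

-- A decides at the root without recursing: every access it makes there is valid, and either an
-- adjacent merge fires (in A's branch order) or no neighbor qualifies for the search
def pvRootDecidedB (map : List (List Int)) (y x : Int) : Bool :=
  pvValidB map y x &&
  ((decide (0 < y) && pvValidB map (y-1) x && (pvCell map (y-1) x == pvCell map y x)) ||
   ((!decide (0 < y) || pvValidB map (y-1) x) &&
    ((decide (0 < x) && pvValidB map y (x-1) && (pvCell map y (x-1) == pvCell map y x)) ||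
     ((!decide (0 < x) || pvValidB map y (x-1)) &&
      ((decide (x < 7) && pvValidB map y (x+1) && (pvCell map y (x+1) == pvCell map y x)) ||
       ((!decide (x < 7) || pvValidB map y (x+1)) &&
        pvNoQual (pvCell map y x) (pvNeighbors map y x)))))))

def Pre_try_upgrade_block (map : List (List Int)) (y : Int) (x : Int) : Prop :=
  (map ≠ [] ∧ -(map.length : Int) ≤ y ∧ y < (map.length : Int) ∧
   ∀ row ∈ pvRowsNeeded map y, max x 7 < (row.length : Int) ∧ -(row.length : Int) ≤ min x 0) ∨
  pvRootDecidedB map y x = true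
instance (map : List (List Int)) (y : Int) (x : Int) : Decidable (Pre_try_upgrade_block map y x) := by
  unfold Pre_try_upgrade_block; infer_instance

def pvWitness_try_upgrade_block : List (List Int) × Int × Int := ([[0, 0, 0, 0, 0, 0, 0, 0]], 0, 0)

def Spec_try_upgrade_block (map : List (List Int)) (y : Int) (x : Int) (out : Option Int) : Prop := out = try_upgrade_block_alt map y x
instance (map : List (List Int)) (y : Int) (x : Int) (out : Option Int) : Decidable (Spec_try_upgrade_block map y x out) := by unfold Spec_try_upgrade_block; infer_instance

-- ===== CLAIM (what is proved, stated in full; the proofs are below) =====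
def Claim_equal_try_upgrade_block : Prop := ∀ (map : List (List Int)) (y : Int) (x : Int), Dom_try_upgrade_block map y x → Pre_try_upgrade_block map y x → Spec_try_upgrade_block map y x (try_upgrade_block map y x)

-- ===== LEMMAS AND PROOFS =====

-- every entry of the (sorted) neighbor list stores the cell value at its own coordinates
theorem pv_cell_of_mem_nbrs {map : List (List Int)} {y x : Int} {n : Int × Int × Int}
    (h : n ∈ pvNeighbors map y x) : n.1 = pvCell map n.2.1 n.2.2 := by
  unfold pvNeighbors at h
  simp only [List.mem_append] at h
  rcases h with (h | h) | h <;>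
  · split at h
    · simp only [List.mem_singleton] at h; rw [h]
    · simp at h

theorem pv_cell_of_mem_sorted {map : List (List Int)} {y x : Int} {n : Int × Int × Int}
    (h : n ∈ pvSortedNbrs map y x) : n.1 = pvCell map n.2.1 n.2.2 :=
  pv_cell_of_mem_nbrs ((PySem.List.mem_sorted _ _ _ _).mp h)

-- inside Dom every cell value fits under the fuel
theorem pv_cell_bound {map : List (List Int)} {y x : Int} (h : Dom_try_upgrade_block map y x)
    (i j : Int) : (pvCell map i j).toNat < 2147483650 := by
  unfold Dom_try_upgrade_block at h
  simp only [Bool.and_eq_true, List.all_eq_true, pvDomInt, decide_eq_true_eq] at h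
  unfold pvCell
  cases hr : PySem.List.pyGet? map i with
  | none => simp [PySem.List.pyGet?]
  | some row =>
    cases hv : PySem.List.pyGet? row j with
    | none => simp only [Option.getD_some]; rw [hv]; simp
    | some v =>
      have hrow := PySem.List.mem_of_pyGet?_eq_some _ hr
      have hvm := PySem.List.mem_of_pyGet?_eq_some _ hv
      have := h.1.1 row hrow v hvm
      simp only [Option.getD_some]
      rw [hv]
      simp only [Option.getD_some]
      omega

-- A never returns some 0 (its possible results are 4, 2, 1)
theorem pv_nonzero (map : List (List Int)) (f : Nat) :
    (∀ y x a, pvGoA map f y x = some a → a ≠ 0) ∧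
    (∀ block ns a, pvLoopA map f block ns = some a → a ≠ 0) := by
  induction f with
  | zero =>
    constructor
    · intro y x a h; simp [pvGoA] at h
    · intro block ns a h
      induction ns with
      | nil => simp [pvLoopA] at h
      | cons n ns ih =>
        rw [pvLoopA] at h
        simp only [pvGoA] at h
        split at h <;> exact ih h
  | succ f ihf =>
    have hA : ∀ y x a, pvGoA map (f+1) y x = some a → a ≠ 0 := by
      intro y x a h
      rw [pvGoA] at h
      split_ifs at h
      · cases h; decide
      · cases h; decide
      · cases h; decide
      · exact ihf.2 _ _ _ h
    refine ⟨hA, ?_⟩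
    intro block ns a h
    induction ns with
    | nil => simp [pvLoopA] at h
    | cons n ns ih =>
      rw [pvLoopA] at h
      split at h
      · cases hg : pvGoA map (f+1) n.2.1 n.2.2 with
        | some a' =>
          rw [hg] at h
          simp only at h
          split at h
          · exact ih h
          · cases h; exact hA _ _ _ hg
        | none => rw [hg] at h; exact ih h
      · exact ih h

-- fuel irrelevance: any fuel above the popped cell's value gives the same answer
theorem pvFI (map : List (List Int)) :
    ∀ (c : Nat) (y x : Int) (f1 f2 : Nat), (pvCell map y x).toNat < c →
      (pvCell map y x).toNat < f1 → (pvCell map y x).toNat < f2 →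
      pvGoA map f1 y x = pvGoA map f2 y x := by
  intro c
  induction c with
  | zero => intro y x f1 f2 hc; exact absurd hc (Nat.not_lt_zero _)
  | succ c ihc =>
    intro y x f1 f2 hc h1 h2
    obtain ⟨a, rfl⟩ : ∃ a, f1 = a + 1 := ⟨f1 - 1, by omega⟩
    obtain ⟨b, rfl⟩ : ∃ b, f2 = b + 1 := ⟨f2 - 1, by omega⟩
    rw [pvGoA, pvGoA]
    split_ifs
    · rfl
    · rfl
    · rfl
    have hsub : ∀ ns, (∀ n ∈ ns, n.1 = pvCell map n.2.1 n.2.2) →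
        pvLoopA map a (pvCell map y x) ns = pvLoopA map b (pvCell map y x) ns := by
      intro ns
      induction ns with
      | nil => intro _; rw [pvLoopA, pvLoopA]
      | cons n ns ih =>
        intro hmem
        have hmem' : ∀ m ∈ ns, m.1 = pvCell map m.2.1 m.2.2 :=
          fun m hm => hmem m (List.mem_cons_of_mem _ hm)
        rw [pvLoopA, pvLoopA]
        by_cases hcnd : n.1 < pvCell map y x ∧ 0 < n.1
        · rw [if_pos hcnd, if_pos hcnd]
          have hn := hmem n List.mem_cons_self
          have hg : pvGoA map a n.2.1 n.2.2 = pvGoA map b n.2.1 n.2.2 := by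
            apply ihc n.2.1 n.2.2 a b <;> rw [← hn] <;> omega
          rw [hg]
          cases hgb : pvGoA map b n.2.1 n.2.2 with
          | none => exact ih hmem'
          | some a' =>
            simp only
            split
            · exact ih hmem'
            · rfl
        · rw [if_neg hcnd, if_neg hcnd]; exact ih hmem'
    exact hsub _ (fun n hn => pv_cell_of_mem_sorted hn)

-- proof-side view of B's stack: first non-none result of A's recursion over the stack entries
def pvFirst (map : List (List Int)) : List (Int × Int × Int) → Option Int
  | [] => none
  | t :: rest =>
    match pvGoA map (t.1.toNat + 1) t.2.1 t.2.2 with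
    | some a => some a
    | none => pvFirst map rest

theorem pv_loop_first (map : List (List Int)) (v : Int) :
    ∀ (ns : List (Int × Int × Int)) (rest : List (Int × Int × Int)),
      (∀ n ∈ ns, n.1 = pvCell map n.2.1 n.2.2) →
      pvFirst map ((ns.filter (fun n => decide (n.1 < v ∧ 0 < n.1))) ++ rest) =
        (match pvLoopA map v.toNat v ns with
         | some a => some a
         | none => pvFirst map rest) := by
  intro ns
  induction ns with
  | nil => intro rest _; simp [pvLoopA]
  | cons n ns ih =>
    intro rest hmem
    have hmem2 : ∀ m ∈ ns, m.1 = pvCell map m.2.1 m.2.2 :=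
      fun m hm => hmem m (List.mem_cons_of_mem _ hm)
    rw [pvLoopA]
    by_cases hc : n.1 < v ∧ 0 < n.1
    · rw [if_pos hc]
      have hfil : (n :: ns).filter (fun n => decide (n.1 < v ∧ 0 < n.1)) =
          n :: ns.filter (fun n => decide (n.1 < v ∧ 0 < n.1)) := by
        simp [hc]
      rw [hfil, List.cons_append, pvFirst]
      have hn := hmem n List.mem_cons_self
      have hg : pvGoA map v.toNat n.2.1 n.2.2 = pvGoA map (n.1.toNat + 1) n.2.1 n.2.2 := by
        apply pvFI map v.toNat n.2.1 n.2.2 <;> rw [← hn] <;> omega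
      rw [← hg]
      cases hr : pvGoA map v.toNat n.2.1 n.2.2 with
      | none => simp only; exact ih rest hmem2
      | some a2 =>
        have hne : a2 ≠ 0 := (pv_nonzero map v.toNat).1 _ _ _ hr
        simp only
        rw [if_neg hne]
    · rw [if_neg hc]
      have hfil : (n :: ns).filter (fun n => decide (n.1 < v ∧ 0 < n.1)) =
          ns.filter (fun n => decide (n.1 < v ∧ 0 < n.1)) := by
        simp [hc]
      rw [hfil]
      exact ih rest hmem2

theorem pv_main (map : List (List Int)) :
    ∀ st, (∀ t ∈ st, t.1 = pvCell map t.2.1 t.2.2) → pvGoB map st = pvFirst map st := by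
  suffices H : ∀ (m : Nat) (st : List (Int × Int × Int)),
      (st.map (fun t => 4 ^ t.1.toNat)).sum < m →
      (∀ t ∈ st, t.1 = pvCell map t.2.1 t.2.2) → pvGoB map st = pvFirst map st by
    exact fun st hinv => H ((st.map (fun t => 4 ^ t.1.toNat)).sum + 1) st (by omega) hinv
  intro m
  induction m with
  | zero => intro st h; exact absurd h (Nat.not_lt_zero _)
  | succ m ihm =>
    intro st hm hinv
    match st with
    | [] => rw [pvGoB]; rfl
    | (block, y, x) :: rest =>
      have hb : block = pvCell map y x := hinv _ List.mem_cons_self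
      rw [pvGoB]
      simp only [pvFirst]
      rw [pvGoA, ← hb]
      split_ifs with h1 h2 h3
      · rfl
      · rfl
      · rfl
      · have hinv2 : ∀ t ∈ ((pvSortedNbrs map y x).filter
            (fun n => decide (n.1 < block ∧ 0 < n.1))) ++ rest,
            t.1 = pvCell map t.2.1 t.2.2 := by
          intro t ht
          rcases List.mem_append.mp ht with h | h
          · exact pv_cell_of_mem_sorted (List.mem_of_mem_filter h)
          · exact hinv t (List.mem_cons_of_mem _ h)
        have hdec : ((((pvSortedNbrs map y x).filter
            (fun n => decide (n.1 < block ∧ 0 < n.1))) ++ rest).map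
            (fun t => 4 ^ t.1.toNat)).sum < m := by
          have hfl : ∀ t ∈ (pvSortedNbrs map y x).filter
              (fun n => decide (n.1 < block ∧ 0 < n.1)), t.1.toNat < block.toNat := by
            intro t ht
            have := List.of_mem_filter ht
            simp only [decide_eq_true_eq] at this
            omega
          have hln : ((pvSortedNbrs map y x).filter
              (fun n => decide (n.1 < block ∧ 0 < n.1))).length ≤ 3 := by
            calc ((pvSortedNbrs map y x).filter _).length
                ≤ (pvSortedNbrs map y x).length := List.length_filter_le _ _
              _ = (pvNeighbors map y x).length := PySem.List.length_sorted _ _ _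
              _ ≤ 3 := pvNbrsLen map y x
          have hsum := pvSumPowLt _ block.toNat hln hfl
          simp only [List.map_append, List.sum_append] at *
          simp only [List.map_cons, List.sum_cons] at hm
          omega
        have heq := ihm _ hdec hinv2
        rw [heq]
        have hloop := pv_loop_first map block (pvSortedNbrs map y x) rest
          (fun n hn => pv_cell_of_mem_sorted hn)
        rw [hloop]

-- ===== VERDICT (by name: the statement is the Claim_ definition above) =====
theorem try_upgrade_block_spec : Claim_equal_try_upgrade_block := by
  intro map y x hdom _hpre
  unfold Spec_try_upgrade_block try_upgrade_block try_upgrade_block_alt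
  have hmain := pv_main map [(pvCell map y x, y, x)] (by intro t ht; simp at ht; subst ht; rfl)
  rw [hmain]
  have hfi := pvFI map ((pvCell map y x).toNat + 1) y x 2147483650 ((pvCell map y x).toNat + 1)
    (by omega) (pv_cell_bound hdom y x) (by omega)
  rw [hfi]
  cases hg : pvGoA map ((pvCell map y x).toNat + 1) y x <;> simp [pvFirst, hg]
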